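-- pv_equiv track=rewrite | github.com/CGRU/cgru | afanasy/trunk/python3/afpathmap.py | findPathEnd
-- ===== SOURCE A (Python) =====
-- def findPathEnd( path):
--    PathEnd = ' ";'
--    position = 0
--    pathlen = len(path)
--    if pathlen <= 1: return 1
--    while position < pathlen:
--       position += 1
--       if position >= pathlen: break
--       if path[position] in PathEnd: break
--    return position
-- ===== SOURCE B (Python) =====
-- def findPathEnd(path):
--     if len(path) <= 1:
--         return 1
--     hits = [p for p in (path.find(c, 1) for c in ' ";') if p != -1]
--     return min(hits, default=len(path))
-- ===== Notes on version B (the rewrite author's own statement) =====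
-- stated objective: faster
-- what changed: Replaces the index-stepping while loop that tests each character for terminator membership with one built-in substring search (str.find with start 1) per terminator character (space, double quote, semicolon), combined by min with len(path) as default.
import Mathlib
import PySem

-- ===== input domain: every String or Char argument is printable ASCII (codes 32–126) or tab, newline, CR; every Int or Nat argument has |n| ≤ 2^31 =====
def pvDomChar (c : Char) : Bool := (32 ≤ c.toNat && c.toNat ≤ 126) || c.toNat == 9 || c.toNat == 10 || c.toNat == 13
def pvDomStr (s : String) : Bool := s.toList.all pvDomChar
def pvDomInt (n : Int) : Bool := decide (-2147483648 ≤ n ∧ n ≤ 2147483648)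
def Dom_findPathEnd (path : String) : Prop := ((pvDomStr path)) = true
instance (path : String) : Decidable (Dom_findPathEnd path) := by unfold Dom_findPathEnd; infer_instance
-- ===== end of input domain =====

-- B replaces A's character-by-character scanning loop by one built-in search per
-- terminator character (str.find with start 1) combined by min with a default; objective: faster (constant factor, C-level search).

-- ===== PORT A =====
-- A's while loop; the index position+1 is in range in the branch where it is read,
-- so List.pyGetD with an arbitrary default ' ' is exact there
def findPathEndLoop (l : List Char) (pathlen : Nat) (position : Nat) : Nat :=
  if position < pathlen then
    if pathlen ≤ position + 1 then position + 1
    else if PySem.Chars.isIn [PySem.List.pyGetD l ((position + 1 : Nat) : Int) ' '] [' ', '"', ';']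
      then position + 1
    else findPathEndLoop l pathlen (position + 1)
  else position
termination_by pathlen - position


def findPathEnd (path : String) : Int :=
  let pathlen := path.toList.length
  if pathlen ≤ 1 then 1 else (findPathEndLoop path.toList pathlen 0 : Int)


-- ===== PORT B =====
def findPathEnd_alt (path : String) : Int :=
  let l := path.toList
  if l.length ≤ 1 then 1
  else
    let hits := ([' ', '"', ';'].map (fun c => PySem.Chars.findFrom l [c] 1)).filter
      (fun q => q != -1)
    PySem.List.minD hits id (l.length : Int)


-- ===== PRECONDITION & SPEC =====
def Spec_findPathEnd (path : String) (out : Int) : Prop := out = findPathEnd_alt path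
instance (path : String) (out : Int) : Decidable (Spec_findPathEnd path out) := by unfold Spec_findPathEnd; infer_instance

-- ===== CLAIM (what is proved, stated in full; the proofs are below) =====
def Claim_equal_findPathEnd : Prop := ∀ (path : String), Dom_findPathEnd path → Spec_findPathEnd path (findPathEnd path)

-- ===== LEMMAS AND PROOFS =====

-- the terminator test `path[position] in ' ";'` as a Boolean predicate on one character
def pTerm (x : Char) : Bool := x == ' ' || x == '"' || x == ';'

lemma isIn_singleton_term (x : Char) :
    PySem.Chars.isIn [x] [' ', '"', ';'] = pTerm x := by
  cases hx : pTerm x with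
  | true =>
    simp only [pTerm, Bool.or_eq_true, beq_iff_eq] at hx
    exact (PySem.Chars.isIn_iff_infix _ _).mpr ((List.singleton_infix_iff _ _).mpr (by
      rcases hx with (h | h) | h <;> simp [h]))
  | false =>
    have hx' : ¬ (x = ' ' ∨ x = '"' ∨ x = ';') := by
      intro h; rcases h with h | h | h <;> simp [pTerm, h] at hx
    exact (PySem.Chars.isIn_eq_false_iff _ _).mpr (by
      rw [List.singleton_infix_iff]; simpa using hx')

lemma prefix_singleton_drop (c : Char) (d : List Char) (i : Nat) :
    [c] <+: d.drop i ↔ d[i]? = some c := by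
  constructor
  · rintro ⟨t, ht⟩
    have : (d.drop i).head? = some c := by rw [← ht]; rfl
    simpa [List.head?_drop] using this
  · intro h
    refine ⟨(d.drop i).tail, ?_⟩
    have : (d.drop i).head? = some c := by simpa [List.head?_drop] using h
    exact List.cons_head?_tail this

lemma find_singleton_neg_one (d : List Char) (c : Char) :
    PySem.Chars.find d [c] = -1 ↔ c ∉ d := by
  rw [PySem.Chars.find_eq_neg_one_iff, List.singleton_infix_iff]

lemma find_singleton_spec (d : List Char) (c : Char) (h : PySem.Chars.find d [c] ≠ -1) :
    ∃ t : Nat, PySem.Chars.find d [c] = (t : Int) ∧ t < d.length ∧ d[t]? = some c ∧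
      ∀ i < t, d[i]? ≠ some c := by
  have h0 : 0 ≤ PySem.Chars.find d [c] := by
    have := PySem.Chars.neg_one_le_find d [c]; omega
  obtain ⟨hpre, hmin⟩ := PySem.Chars.find_spec h0
  have hget : d[(PySem.Chars.find d [c]).toNat]? = some c :=
    (prefix_singleton_drop c d _).mp hpre
  obtain ⟨hlt, -⟩ := List.getElem?_eq_some_iff.mp hget
  exact ⟨(PySem.Chars.find d [c]).toNat, by omega, hlt, hget,
    fun i hi hsi => hmin i hi ((prefix_singleton_drop c d i).mpr hsi)⟩

lemma foldl_isSome {f : Option Int → Int → Option Int}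
    (hf : ∀ a x, (f (some a) x).isSome) : ∀ (t : List Int) (a : Int),
    (List.foldl f (some a) t).isSome := by
  intro t
  induction t with
  | nil => intro a; simp
  | cons b t ih =>
    intro a
    rw [List.foldl_cons]
    obtain ⟨y, hy⟩ := Option.isSome_iff_exists.mp (hf a b)
    rw [hy]
    exact ih y

lemma min?_cons_some (t : List Int) (a : Int) : ∃ y, PySem.List.min? (a :: t) id = some y := by
  refine Option.isSome_iff_exists.mp ?_
  unfold PySem.List.min?
  rw [List.foldl_cons]
  exact foldl_isSome (fun a x => by dsimp only; split <;> simp) t a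

lemma minD_eq_of_mem_of_le (xs : List Int) (m d : Int) (hmem : m ∈ xs)
    (hle : ∀ x ∈ xs, m ≤ x) : PySem.List.minD xs id d = m := by
  have hsome : ∃ y, PySem.List.min? xs id = some y := by
    rcases xs with _ | ⟨a, t⟩
    · simp at hmem
    · exact min?_cons_some t a
  obtain ⟨y, hy⟩ := hsome
  have h1 : y ≤ m := PySem.List.min?_isMin hy m hmem
  have h2 : m ≤ y := hle y (PySem.List.min?_mem hy)
  unfold PySem.List.minD
  rw [hy]
  simp only [Option.getD_some]
  omega


-- A's loop counts up to the first terminator strictly after `position`, or to the length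
lemma loopA_eq (l : List Char) :
    ∀ (k position : Nat), l.length - position = k → position < l.length →
    (findPathEndLoop l l.length position : Int)
      = (position : Int) + 1 + ((l.drop (position + 1)).findIdx pTerm : Int) := by
  intro k
  induction k with
  | zero => intro position hk hlt; omega
  | succ k ih =>
    intro position hk hlt
    rw [findPathEndLoop, if_pos hlt]
    by_cases hend : l.length ≤ position + 1
    · rw [if_pos hend]
      rw [List.drop_eq_nil_of_le hend]
      simp
    · rw [if_neg hend]
      have hlt' : position + 1 < l.length := by omega
      have hget : PySem.List.pyGetD l ((position + 1 : Nat) : Int) ' ' = l[position + 1] := by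
        rw [PySem.List.pyGetD_natCast]
        exact List.getD_eq_getElem l ' ' hlt'
      rw [hget, isIn_singleton_term]
      have hcons : l.drop (position + 1) = l[position + 1] :: l.drop (position + 1 + 1) :=
        List.drop_eq_getElem_cons hlt'
      by_cases hp : pTerm l[position + 1] = true
      · rw [if_pos hp, hcons, List.findIdx_cons, hp]
        simp
      · rw [if_neg hp]
        have hrec := ih (position + 1) (by omega) hlt'
        rw [hrec, hcons, List.findIdx_cons, eq_false_of_ne_true hp]
        simp only [cond_false]
        push_cast
        ring

-- B computes 1 + the first terminator index in l.drop 1 (or the length) when 2 ≤ |l|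
lemma alt_eq (l : List Char) (h2 : 2 ≤ l.length) :
    PySem.List.minD
      (([' ', '"', ';'].map (fun c => PySem.Chars.findFrom l [c] 1)).filter (fun q => q != -1))
      id (l.length : Int)
      = 1 + (((l.drop 1).findIdx pTerm : Nat) : Int) := by
  have hk1 := PySem.Chars.findFrom_natCast l [' '] 1 (by omega)
  have hk2 := PySem.Chars.findFrom_natCast l ['"'] 1 (by omega)
  have hk3 := PySem.Chars.findFrom_natCast l [';'] 1 (by omega)
  simp only [Nat.cast_one] at hk1 hk2 hk3
  set d := l.drop 1 with hd
  have hdlen : d.length = l.length - 1 := by simp [hd]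
  simp only [List.map, hk1, hk2, hk3]
  set j := d.findIdx pTerm with hj
  by_cases hjl : j < d.length
  · -- a terminator exists in d; the first one is at index j
    have hpj : pTerm (d[j]'hjl) = true := List.findIdx_getElem (w := hjl)
    have hbefore : ∀ i, i < j → ∀ c : Char, pTerm c = true → d[i]? ≠ some c := by
      intro i hi c hc hsome
      obtain ⟨hil, hieq⟩ := List.getElem?_eq_some_iff.mp hsome
      have hf : pTerm (d[i]'hil) = false := List.not_of_lt_findIdx (by omega)
      rw [hieq, hc] at hf
      simp at hf
    have hge : ∀ c : Char, pTerm c = true → PySem.Chars.find d [c] ≠ -1 →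
        (j : Int) ≤ PySem.Chars.find d [c] := by
      intro c hc hne
      obtain ⟨t, ht, htl, hget, -⟩ := find_singleton_spec d c hne
      rw [ht]
      by_contra hlt
      exact hbefore t (by omega) c hc hget
    have hexact : PySem.Chars.find d [d[j]'hjl] = (j : Int) := by
      have hget : d[j]? = some (d[j]'hjl) := List.getElem?_eq_some_iff.mpr ⟨hjl, rfl⟩
      have hne : PySem.Chars.find d [d[j]'hjl] ≠ -1 := by
        simp only [ne_eq, find_singleton_neg_one]
        simp [List.getElem_mem]
      obtain ⟨t, ht, htl, -, hmin⟩ := find_singleton_spec d (d[j]'hjl) hne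
      have hle : t ≤ j := by
        by_contra hgt
        exact hmin j (by omega) hget
      have hge' := hge (d[j]'hjl) hpj hne
      rw [ht] at hge' ⊢
      omega
    apply minD_eq_of_mem_of_le
    · -- 1 + j is in the filtered list
      rw [List.mem_filter]
      refine ⟨?_, by simp [bne_iff_ne]; omega⟩
      have hpj' := hpj
      simp only [pTerm, Bool.or_eq_true, beq_iff_eq] at hpj'
      rcases hpj' with (h | h) | h
      · rw [h] at hexact
        rw [show (if PySem.Chars.find d [' '] = -1 then (-1 : Int)
            else 1 + PySem.Chars.find d [' ']) = 1 + (j : Int) by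
          rw [hexact, if_neg (by omega)]] at *
        exact List.mem_cons_self
      · rw [h] at hexact
        refine List.mem_cons_of_mem _ ?_
        rw [show (if PySem.Chars.find d ['"'] = -1 then (-1 : Int)
            else 1 + PySem.Chars.find d ['"']) = 1 + (j : Int) by
          rw [hexact, if_neg (by omega)]] at *
        exact List.mem_cons_self
      · rw [h] at hexact
        refine List.mem_cons_of_mem _ (List.mem_cons_of_mem _ ?_)
        rw [show (if PySem.Chars.find d [';'] = -1 then (-1 : Int)
            else 1 + PySem.Chars.find d [';']) = 1 + (j : Int) by
          rw [hexact, if_neg (by omega)]] at *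
        exact List.mem_cons_self
    · -- every member of the filtered list is ≥ 1 + j
      intro x hx
      rw [List.mem_filter] at hx
      obtain ⟨hxmem, hxne⟩ := hx
      rw [bne_iff_ne] at hxne
      simp only [List.mem_cons, List.not_mem_nil, or_false] at hxmem
      rcases hxmem with h | h | h <;> subst h <;> split_ifs at hxne ⊢ with hf
      · exact absurd rfl hxne
      · have := hge ' ' (by decide) hf; omega
      · exact absurd rfl hxne
      · have := hge '"' (by decide) hf; omega
      · exact absurd rfl hxne
      · have := hge ';' (by decide) hf; omega
  · -- no terminator in d: every find is -1 and the filter is empty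
    have hjlen : j = d.length := by
      have := List.findIdx_le_length (p := pTerm) (xs := d)
      omega
    have habs : ∀ c : Char, pTerm c = true → PySem.Chars.find d [c] = -1 := by
      intro c hc
      rw [find_singleton_neg_one]
      intro hmem
      exact hjl (List.findIdx_lt_length.mpr ⟨c, hmem, hc⟩)
    rw [habs ' ' (by decide), habs '"' (by decide), habs ';' (by decide)]
    simp [PySem.List.minD, PySem.List.min?, List.filter]
    omega

-- ===== VERDICT (by name: the statement is the Claim_ definition above) =====
theorem findPathEnd_spec : Claim_equal_findPathEnd := by
  intro path _
  unfold Spec_findPathEnd findPathEnd findPathEnd_alt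
  dsimp only
  by_cases h : path.toList.length ≤ 1
  · rw [if_pos h, if_pos h]
  · rw [if_neg h, if_neg h]
    have h2 : 2 ≤ path.toList.length := by omega
    rw [loopA_eq path.toList (path.toList.length - 0) 0 rfl (by omega)]
    rw [alt_eq path.toList h2]
    push_cast
    ring
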